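-- pv_equiv track=rewrite | github.com/Tanvir-Mahamood/Digital-Signal-Processing | LabReports/2003062_Lab 2.py | shifting_signal
-- ===== SOURCE A (Python) =====
-- def shifting_signal(x1, k):
--     y_shifted = {}
--
--     left = min(x1.keys())
--     right = max(x1.keys())
--
--
--     for n in range(left - k, right - k + 1): # Shifting
--         if n + k in x1:
--             y_shifted[n] = x1[n + k]
--
--     return y_shifted
-- ===== SOURCE B (Python) =====
-- def shifting_signal(x1, k):
--     # Iterate the signal's own (sorted) items once, shifting each index by k.
--     return {m - k: v for m, v in sorted(x1.items(), key=lambda p: p[0])}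
-- ===== Notes on version B (the rewrite author's own statement) =====
-- stated objective: alternative
-- what changed: A scans every integer n in the shifted range [min-k, max-k], testing n+k for membership; B never builds that range: it sorts the dict's own items once and maps each key m to m-k, so the work depends on the number of keys rather than on the key span (not measurably faster on the dense inputs a timing run generates).
import Mathlib
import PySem

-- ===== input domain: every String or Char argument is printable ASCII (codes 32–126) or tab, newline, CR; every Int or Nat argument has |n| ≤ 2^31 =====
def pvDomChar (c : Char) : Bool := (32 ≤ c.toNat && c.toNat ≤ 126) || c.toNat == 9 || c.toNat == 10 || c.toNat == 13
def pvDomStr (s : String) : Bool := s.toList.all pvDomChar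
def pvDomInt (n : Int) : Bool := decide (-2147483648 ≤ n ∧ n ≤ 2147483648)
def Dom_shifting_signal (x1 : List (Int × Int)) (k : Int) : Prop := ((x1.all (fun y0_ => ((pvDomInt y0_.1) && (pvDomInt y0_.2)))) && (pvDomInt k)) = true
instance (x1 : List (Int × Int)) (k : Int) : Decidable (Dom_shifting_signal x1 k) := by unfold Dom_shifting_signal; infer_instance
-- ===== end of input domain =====

-- B replaces A's scan of the whole shifted index range (a membership test at every
-- integer from min-k to max-k) by one pass over the dict's sorted items, mapping each
-- key m to m-k; equivalence of the return value is proved on nonempty dicts.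

-- ===== PORT A =====
def shifting_signal (x1 : List (Int × Int)) (k : Int) : List (Int × Int) :=
  let d := PySem.Dict.ofList x1
  match PySem.List.min? d.keys (fun x => x), PySem.List.max? d.keys (fun x => x) with
  | some left, some right =>
      -- for n in range(left - k, right - k + 1): if n + k in x1: y_shifted[n] = x1[n + k]
      -- (every appended key n is fresh, so the dict build is a plain append)
      (PySem.List.pyRange (left - k) (right - k + 1) 1).foldl
        (fun acc n => if d.contains (n + k) then acc ++ [(n, d.getD (n + k) 0)] else acc) []
  | _, _ => []  -- unreachable under Pre_: min/max of an empty dict raise ValueError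

-- ===== PORT B =====
def shifting_signal_alt (x1 : List (Int × Int)) (k : Int) : List (Int × Int) :=
  (PySem.List.sorted (PySem.Dict.ofList x1).items (fun p => p.1)).map (fun p => (p.1 - k, p.2))

-- ===== PRECONDITION & SPEC =====
-- Pre_ excludes only the empty dict, on which A raises ValueError (min of an empty sequence).
def Pre_shifting_signal (x1 : List (Int × Int)) (k : Int) : Prop := x1 ≠ []
instance (x1 : List (Int × Int)) (k : Int) : Decidable (Pre_shifting_signal x1 k) := by unfold Pre_shifting_signal; infer_instance
def pvWitness_shifting_signal : (List (Int × Int)) × Int := ([(2, 5), (-1, 7)], 3)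


def Spec_shifting_signal (x1 : List (Int × Int)) (k : Int) (out : List (Int × Int)) : Prop := out = shifting_signal_alt x1 k
instance (x1 : List (Int × Int)) (k : Int) (out : List (Int × Int)) : Decidable (Spec_shifting_signal x1 k out) := by unfold Spec_shifting_signal; infer_instance

-- ===== CLAIM (what is proved, stated in full; the proofs are below) =====
def Claim_equal_shifting_signal : Prop := ∀ (x1 : List (Int × Int)) (k : Int), Dom_shifting_signal x1 k → Pre_shifting_signal x1 k → Spec_shifting_signal x1 k (shifting_signal x1 k)

-- ===== LEMMAS AND PROOFS =====

-- The shifted range is the unshifted range with k subtracted pointwise.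
lemma pyRange_sub_shift (a b k : Int) :
    PySem.List.pyRange (a - k) (b - k + 1) 1 = (PySem.List.pyRange a (b + 1) 1).map (fun m => m - k) := by
  rw [PySem.List.pyRange_one, PySem.List.pyRange_one, List.map_map]
  have : b - k + 1 - (a - k) = b + 1 - a := by ring
  rw [this]
  exact List.map_congr_left (fun j _ => by simp [Function.comp]; ring)

-- The keys of the dict are exactly the members of range(min, max+1) the dict contains.
lemma filter_range_contains (d : PySem.Dict Int Int) (left right : Int)
    (hnd : d.keys.Nodup)
    (hmin : PySem.List.min? d.keys (fun x => x) = some left)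
    (hmax : PySem.List.max? d.keys (fun x => x) = some right) :
    ((PySem.List.pyRange left (right + 1) 1).filter (fun m => d.contains m)).Perm d.keys := by
  rw [List.perm_ext_iff_of_nodup ((PySem.List.nodup_pyRange_one left (right + 1)).filter _) hnd]
  intro m
  simp only [List.mem_filter, PySem.List.mem_pyRange_one]
  constructor
  · rintro ⟨-, hc⟩
    exact (PySem.Dict.contains_iff_mem_keys d m).mp hc
  · intro hm
    refine ⟨⟨PySem.List.min?_isMin hmin m hm, ?_⟩, (PySem.Dict.contains_iff_mem_keys d m).mpr hm⟩
    have := PySem.List.max?_isMax hmax m hm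
    omega

-- A nonempty association list yields a dict with at least one key.
lemma keys_ofList_ne_nil (x1 : List (Int × Int)) (h : x1 ≠ []) :
    (PySem.Dict.ofList x1).keys ≠ [] := by
  have hk : (PySem.Dict.ofList x1).keys
      = PySem.Set.update (PySem.Dict.empty (κ := Int) (ν := Int)).keys (x1.map Prod.fst) :=
    PySem.Dict.keys_foldl_insert_key x1 Prod.fst (fun d p => p.2) PySem.Dict.empty
  cases x1 with
  | nil => exact absurd rfl h
  | cons p t =>
    intro hnil
    have hm : p.1 ∈ (PySem.Dict.ofList (p :: t)).keys := by
      rw [hk]; simp [PySem.Set.mem_update]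
    simp [hnil] at hm

-- sorted(items) is the filtered range, paired with the stored values.
lemma sorted_items_eq (d : PySem.Dict Int Int) (left right : Int)
    (hnd : d.keys.Nodup)
    (hmin : PySem.List.min? d.keys (fun x => x) = some left)
    (hmax : PySem.List.max? d.keys (fun x => x) = some right) :
    PySem.List.sorted d.items (fun p => p.1)
      = ((PySem.List.pyRange left (right + 1) 1).filter (fun m => d.contains m)).map
          (fun m => (m, d.getD m 0)) := by
  apply PySem.List.sorted_eq_of_perm_of_pairwise_lt
  · rw [PySem.Dict.items_eq_map_keys d hnd 0]
    exact (filter_range_contains d left right hnd hmin hmax).map _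
  · exact ((PySem.List.pairwise_lt_pyRange_one left (right + 1)).filter _).map _
      (fun a b hab => hab)

-- ===== VERDICT (by name: the statement is the Claim_ definition above) =====
theorem shifting_signal_spec : Claim_equal_shifting_signal := by
  intro x1 k _ hpre
  unfold Spec_shifting_signal shifting_signal shifting_signal_alt
  set d := PySem.Dict.ofList x1 with hd
  have hnd : d.keys.Nodup := PySem.Dict.nodup_keys_ofList x1
  have hne : d.keys ≠ [] := keys_ofList_ne_nil x1 hpre
  obtain ⟨left, hmin⟩ : ∃ l, PySem.List.min? d.keys (fun x => x) = some l := by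
    cases h : PySem.List.min? d.keys (fun x => x) with
    | some l => exact ⟨l, rfl⟩
    | none => exact absurd ((PySem.List.min?_eq_none_iff _ _).mp h) hne
  obtain ⟨right, hmax⟩ : ∃ r, PySem.List.max? d.keys (fun x => x) = some r := by
    cases h : PySem.List.max? d.keys (fun x => x) with
    | some r => exact ⟨r, rfl⟩
    | none => exact absurd ((PySem.List.max?_eq_none_iff _ _).mp h) hne
  simp only [hmin, hmax]
  rw [PySem.List.foldl_append_if (fun n => d.contains (n + k)) (fun n => (n, d.getD (n + k) 0))]
  rw [pyRange_sub_shift left right k, List.filter_map, List.map_map,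
      sorted_items_eq d left right hnd hmin hmax, List.map_map]
  rw [List.nil_append]
  rw [List.filter_congr (p := (fun n => d.contains (n + k)) ∘ fun m => m - k)
      (q := fun m => d.contains m) (fun m _ => by simp [Function.comp, sub_add_cancel])]
  exact List.map_congr_left (fun m _ => by simp [Function.comp, sub_add_cancel])
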